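-- pv_equiv track=rewrite | github.com/AdamZhouSE/pythonHomework | Code/CodeRecords/2372/60792/281586.py | solution
-- ===== SOURCE A (Python) =====
-- def solution(l1, l2, o, o1, o2):
--     init = [[0] * (o + 1) for i in range(o + 1)]
--     for i in range(1, o + 1):
--         init[0][i] = init[0][i - 1] + l2[i - 1]
--         init[i][0] = init[i - 1][0] + l1[i - 1]
--     for m in range(1, o + 1):
--         for n in range(1, o + 1):
--             if m + n <= o:
--                 init[m][n] = max(init[m][n - 1] + l2[m + n - 1], init[m - 1][n] + l1[m + n - 1])
--             else:
--                 init[m][n] = max(init[m - 1][n], init[m][n - 1])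
--     return init[-1][-1]
-- ===== SOURCE B (Python) =====
-- def solution(l1, l2, o, o1, o2):
--     # anti-diagonal sweep: one 1-D array per diagonal instead of a full 2-D table
--     prev = [0] * (o + 1)
--     for d in range(1, 2 * o + 1):
--         cur = [0] * (o + 1)
--         for m in range(max(0, d - o), min(d, o) + 1):
--             n = d - m
--             if m == 0:
--                 cur[0] = prev[0] + l2[d - 1]
--             elif n == 0:
--                 cur[m] = prev[m - 1] + l1[d - 1]
--             elif d <= o:
--                 cur[m] = max(prev[m] + l2[d - 1], prev[m - 1] + l1[d - 1])
--             else: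
--                 cur[m] = max(prev[m - 1], prev[m])
--         prev = cur
--     return prev[o]
-- ===== Notes on version B (the rewrite author's own statement) =====
-- stated objective: alternative
-- what changed: B replaces A's full (o+1)x(o+1) table (border pass plus row-major double loop) with an anti-diagonal sweep that keeps only a single 1-D array per diagonal, reducing space from O(o^2) to O(o).
import Mathlib
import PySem

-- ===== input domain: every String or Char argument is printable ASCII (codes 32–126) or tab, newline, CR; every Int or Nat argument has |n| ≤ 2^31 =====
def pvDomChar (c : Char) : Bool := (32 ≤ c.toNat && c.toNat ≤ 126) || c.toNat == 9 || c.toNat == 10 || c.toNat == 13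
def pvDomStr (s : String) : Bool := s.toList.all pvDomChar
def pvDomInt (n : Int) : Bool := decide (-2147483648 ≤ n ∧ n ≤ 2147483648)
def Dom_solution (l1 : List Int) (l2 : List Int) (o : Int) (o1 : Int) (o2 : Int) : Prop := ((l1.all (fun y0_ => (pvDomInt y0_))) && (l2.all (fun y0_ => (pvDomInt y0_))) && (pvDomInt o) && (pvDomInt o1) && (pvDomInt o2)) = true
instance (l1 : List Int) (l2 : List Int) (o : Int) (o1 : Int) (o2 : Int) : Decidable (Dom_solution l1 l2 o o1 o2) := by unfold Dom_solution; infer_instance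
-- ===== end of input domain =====

-- B replaces A's full (o+1)×(o+1) DP table, filled border-first then row by row, with an
-- anti-diagonal sweep keeping only one 1-D array per diagonal (alternative decomposition, O(o) space).

-- ===== PORT A =====
-- init[i][j] as a total read (default 0); under Pre_solution every access A makes is in range.
def pvGet2 (t : List (List Int)) (i j : Int) : Int :=
  PySem.List.pyGetD (PySem.List.pyGetD t i []) j 0

-- init[i][j] = v ; indices A uses are the nonnegative loop counters, hence the Nat arguments.
def pvSet2 (t : List (List Int)) (i j : Nat) (v : Int) : List (List Int) :=
  t.set i ((t.getD i []).set j v)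

-- body of A's first loop: init[0][i] = init[0][i-1] + l2[i-1]; init[i][0] = init[i-1][0] + l1[i-1]
def pvBorderStep (l1 l2 : List Int) (t : List (List Int)) (i : Int) : List (List Int) :=
  let t := pvSet2 t 0 i.toNat (pvGet2 t 0 (i-1) + PySem.List.pyGetD l2 (i-1) 0)
  pvSet2 t i.toNat 0 (pvGet2 t (i-1) 0 + PySem.List.pyGetD l1 (i-1) 0)

-- body of A's inner loop over n (for a fixed m)
def pvCellStep (l1 l2 : List Int) (o m : Int) (t : List (List Int)) (n : Int) : List (List Int) :=
  if m + n ≤ o then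
    pvSet2 t m.toNat n.toNat (max (pvGet2 t m (n-1) + PySem.List.pyGetD l2 (m+n-1) 0)
                                  (pvGet2 t (m-1) n + PySem.List.pyGetD l1 (m+n-1) 0))
  else
    pvSet2 t m.toNat n.toNat (max (pvGet2 t (m-1) n) (pvGet2 t m (n-1)))

def solution (l1 : List Int) (l2 : List Int) (o : Int) (o1 : Int) (o2 : Int) : Int :=
  let init := (PySem.List.pyRange 0 (o+1)).map (fun _ => List.replicate (o+1).toNat (0:Int))
  let init := (PySem.List.pyRange 1 (o+1)).foldl (pvBorderStep l1 l2) init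
  let init := (PySem.List.pyRange 1 (o+1)).foldl
      (fun t m => (PySem.List.pyRange 1 (o+1)).foldl (pvCellStep l1 l2 o m) t) init
  pvGet2 init (-1) (-1)

-- ===== PORT B =====
-- body of B's inner loop: fill cur[m] on diagonal d from prev (diagonal d-1); reads are total
-- (default 0) — under Pre_solution every access B makes is in range.
def pvDiagCell (l1 l2 prev : List Int) (o d : Int) (cur : List Int) (m : Int) : List Int :=
  let n := d - m
  if m = 0 then cur.set 0 (PySem.List.pyGetD prev 0 0 + PySem.List.pyGetD l2 (d-1) 0)
  else if n = 0 then cur.set m.toNat (PySem.List.pyGetD prev (m-1) 0 + PySem.List.pyGetD l1 (d-1) 0)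
  else if d ≤ o then
    cur.set m.toNat (max (PySem.List.pyGetD prev m 0 + PySem.List.pyGetD l2 (d-1) 0)
                         (PySem.List.pyGetD prev (m-1) 0 + PySem.List.pyGetD l1 (d-1) 0))
  else cur.set m.toNat (max (PySem.List.pyGetD prev (m-1) 0) (PySem.List.pyGetD prev m 0))

-- body of B's outer loop: build diagonal d from diagonal d-1
def pvDiagStep (l1 l2 : List Int) (o : Int) (prev : List Int) (d : Int) : List Int :=
  (PySem.List.pyRange (max 0 (d - o)) (min d o + 1)).foldl
    (pvDiagCell l1 l2 prev o d) (List.replicate (o+1).toNat (0:Int))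

def solution_alt (l1 : List Int) (l2 : List Int) (o : Int) (o1 : Int) (o2 : Int) : Int :=
  let prev := List.replicate (o+1).toNat (0:Int)
  let prev := (PySem.List.pyRange 1 (2*o+1)).foldl (pvDiagStep l1 l2 o) prev
  PySem.List.pyGetD prev o 0

-- ===== PRECONDITION & SPEC =====
-- Exactly the inputs on which the Python A returns: o < 0 makes init[-1][-1] an IndexError on the
-- empty table, and o > len(l1) or o > len(l2) makes l1[i-1]/l2[i-1] an IndexError in the first loop.
def Pre_solution (l1 : List Int) (l2 : List Int) (o : Int) (o1 : Int) (o2 : Int) : Prop :=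
  0 ≤ o ∧ o ≤ l1.length ∧ o ≤ l2.length
instance (l1 : List Int) (l2 : List Int) (o : Int) (o1 : Int) (o2 : Int) : Decidable (Pre_solution l1 l2 o o1 o2) := by unfold Pre_solution; infer_instance
def pvWitness_solution : List Int × List Int × Int × Int × Int := ([3, 1], [2, 4], 2, 0, 0)

def Spec_solution (l1 : List Int) (l2 : List Int) (o : Int) (o1 : Int) (o2 : Int) (out : Int) : Prop := out = solution_alt l1 l2 o o1 o2
instance (l1 : List Int) (l2 : List Int) (o : Int) (o1 : Int) (o2 : Int) (out : Int) : Decidable (Spec_solution l1 l2 o o1 o2 out) := by unfold Spec_solution; infer_instance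

-- ===== CLAIM (what is proved, stated in full; the proofs are below) =====
def Claim_equal_solution : Prop := ∀ (l1 : List Int) (l2 : List Int) (o : Int) (o1 : Int) (o2 : Int), Dom_solution l1 l2 o o1 o2 → Pre_solution l1 l2 o o1 o2 → Spec_solution l1 l2 o o1 o2 (solution l1 l2 o o1 o2)

-- ===== LEMMAS AND PROOFS =====

-- the common mathematical recurrence both programs compute: pvF l1 l2 o m n = value of cell (m, n)
def pvF (l1 l2 : List Int) (o : Nat) : Nat → Nat → Int
  | 0, 0 => 0
  | 0, n+1 => pvF l1 l2 o 0 n + l2.getD n 0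
  | m+1, 0 => pvF l1 l2 o m 0 + l1.getD m 0
  | m+1, n+1 =>
      if m + n + 2 ≤ o then
        max (pvF l1 l2 o (m+1) n + l2.getD (m+n+1) 0) (pvF l1 l2 o m (n+1) + l1.getD (m+n+1) 0)
      else max (pvF l1 l2 o m (n+1)) (pvF l1 l2 o (m+1) n)
termination_by m n => m + n

lemma pvF_zero_zero (l1 l2 : List Int) (o : Nat) : pvF l1 l2 o 0 0 = 0 := by rw [pvF]
lemma pvF_zero_succ (l1 l2 : List Int) (o n : Nat) :
    pvF l1 l2 o 0 (n+1) = pvF l1 l2 o 0 n + l2.getD n 0 := by rw [pvF]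
lemma pvF_succ_zero (l1 l2 : List Int) (o m : Nat) :
    pvF l1 l2 o (m+1) 0 = pvF l1 l2 o m 0 + l1.getD m 0 := by rw [pvF]
lemma pvF_succ_succ (l1 l2 : List Int) (o m n : Nat) :
    pvF l1 l2 o (m+1) (n+1) =
      if m + n + 2 ≤ o then
        max (pvF l1 l2 o (m+1) n + l2.getD (m+n+1) 0) (pvF l1 l2 o m (n+1) + l1.getD (m+n+1) 0)
      else max (pvF l1 l2 o m (n+1)) (pvF l1 l2 o (m+1) n) := by rw [pvF]

-- symbolic rows and tables
def pvRow (R : Nat) (ψ : Nat → Int) : List Int := (List.range R).map ψ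
def pvTab (R : Nat) (φ : Nat → Nat → Int) : List (List Int) := (List.range R).map (fun m => pvRow R (φ m))

lemma pvRow_congr (R : Nat) (ψ ψ' : Nat → Int) (h : ∀ m < R, ψ m = ψ' m) :
    pvRow R ψ = pvRow R ψ' := by
  unfold pvRow
  exact List.map_congr_left (fun m hm => h m (List.mem_range.mp hm))

lemma pvTab_congr (R : Nat) (φ φ' : Nat → Nat → Int) (h : ∀ m < R, ∀ n < R, φ m n = φ' m n) :
    pvTab R φ = pvTab R φ' := by
  unfold pvTab
  exact List.map_congr_left (fun m hm => pvRow_congr R _ _ (h m (List.mem_range.mp hm)))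

lemma pvRow_get (R : Nat) (ψ : Nat → Int) (i : Int) (hi0 : 0 ≤ i) (hi : i < (R:Int)) :
    PySem.List.pyGetD (pvRow R ψ) i 0 = ψ i.toNat := by
  lift i to Nat using hi0 with mi
  have hm : mi < R := by omega
  simp [pvRow, List.getD, hm]

lemma pvRow_set (R : Nat) (ψ : Nat → Int) (mi : Nat) (v : Int) (hi : mi < R) :
    (pvRow R ψ).set mi v = pvRow R (fun m => if m = mi then v else ψ m) := by
  unfold pvRow
  apply List.ext_getElem (by simp)
  intro k hk1 hk2
  simp only [List.getElem_set, List.getElem_map, List.getElem_range]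
  by_cases h : mi = k <;> simp [h, eq_comm]

lemma pvTab_getD (R : Nat) (φ : Nat → Nat → Int) (mi : Nat) (hi : mi < R) :
    (pvTab R φ).getD mi [] = pvRow R (φ mi) := by
  simp [pvTab, List.getD, hi]

lemma pvGet2_tab (R : Nat) (φ : Nat → Nat → Int) (i j : Int)
    (hi0 : 0 ≤ i) (hi : i < (R:Int)) (hj0 : 0 ≤ j) (hj : j < (R:Int)) :
    pvGet2 (pvTab R φ) i j = φ i.toNat j.toNat := by
  lift i to Nat using hi0 with mi
  have hm : mi < R := by omega
  unfold pvGet2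
  rw [PySem.List.pyGetD_natCast, pvTab_getD R φ mi hm]
  simpa using pvRow_get R (φ mi) j hj0 hj

lemma pvSet2_tab (R : Nat) (φ : Nat → Nat → Int) (mi mj : Nat) (v : Int)
    (hi : mi < R) (hj : mj < R) :
    pvSet2 (pvTab R φ) mi mj v
      = pvTab R (fun m n => if m = mi ∧ n = mj then v else φ m n) := by
  unfold pvSet2
  rw [pvTab_getD R φ mi hi, pvRow_set R (φ mi) mj v hj]
  unfold pvTab
  apply List.ext_getElem (by simp)
  intro k hk1 hk2
  simp only [List.getElem_set, List.getElem_map, List.getElem_range]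
  by_cases h : mi = k
  · subst h
    simp only [if_pos rfl]
    exact pvRow_congr R _ _ (fun n _ => by by_cases hn : n = mj <;> simp [hn])
  · simp only [if_neg h]
    exact pvRow_congr R _ _ (fun n _ => by simp [Ne.symm h])

-- ---------- A-side: the table after the border loop and after the main loops ----------

def phiB (l1 l2 : List Int) (O k : Nat) (m n : Nat) : Int :=
  if m = 0 ∧ n ≤ k then pvF l1 l2 O 0 n else if n = 0 ∧ m ≤ k then pvF l1 l2 O m 0 else 0

def phiI (l1 l2 : List Int) (O M N : Nat) (m n : Nat) : Int :=
  if m = 0 then pvF l1 l2 O 0 n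
  else if n = 0 then pvF l1 l2 O m 0
  else if m < M ∨ (m = M ∧ n ≤ N) then pvF l1 l2 O m n else 0

lemma borderStep_tab (l1 l2 : List Int) (O k : Nat) (hk : k + 1 ≤ O) :
    pvBorderStep l1 l2 (pvTab (O+1) (phiB l1 l2 O k)) (((k+1:Nat)):Int)
      = pvTab (O+1) (phiB l1 l2 O (k+1)) := by
  unfold pvBorderStep
  have e1 : (((k+1:Nat)):Int) - 1 = ((k:Nat):Int) := by push_cast; ring
  rw [e1]
  rw [pvGet2_tab (O+1) _ 0 ((k:Nat):Int) (by omega) (by omega) (by omega) (by omega)]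
  rw [PySem.List.pyGetD_natCast]
  simp only [Int.toNat_natCast, Int.toNat_zero]
  have h00 : phiB l1 l2 O k 0 k = pvF l1 l2 O 0 k := by simp [phiB]
  rw [h00]
  rw [pvSet2_tab (O+1) _ 0 (k+1) _ (by omega) (by omega)]
  rw [pvGet2_tab (O+1) _ ((k:Nat):Int) 0 (by omega) (by omega) (by omega) (by omega)]
  simp only [Int.toNat_natCast, Int.toNat_zero]
  have hk0 : (if (k:Nat) = 0 ∧ (0:Nat) = k + 1 then pvF l1 l2 O 0 k + l2.getD k 0 else phiB l1 l2 O k k 0)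
      = pvF l1 l2 O k 0 := by
    have : ¬ ((k:Nat) = 0 ∧ (0:Nat) = k + 1) := by omega
    rw [if_neg this]
    rcases k with _ | k' <;> simp [phiB]
  rw [hk0]
  rw [pvSet2_tab (O+1) _ (k+1) 0 _ (by omega) (by omega)]
  apply pvTab_congr
  intro m hm n hn
  rw [PySem.List.pyGetD_natCast, ← pvF_succ_zero, ← pvF_zero_succ]
  by_cases h1 : m = k + 1 ∧ n = 0
  · obtain ⟨rfl, rfl⟩ := h1
    simp [phiB]
  · rw [if_neg h1]
    by_cases h2 : m = 0 ∧ n = k + 1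
    · obtain ⟨rfl, rfl⟩ := h2
      simp [phiB]
    · rw [if_neg h2]
      simp only [phiB]
      split_ifs <;> first | rfl | omega

lemma border_loop (l1 l2 : List Int) (O k : Nat) (hk : k ≤ O) :
    (PySem.List.pyRange 1 (((k+1:Nat)):Int)).foldl (pvBorderStep l1 l2)
        (pvTab (O+1) (fun _ _ => 0))
      = pvTab (O+1) (phiB l1 l2 O k) := by
  induction k with
  | zero =>
    rw [show (((0+1:Nat)):Int) = 1 from by norm_num]
    rw [show PySem.List.pyRange 1 1 = [] from by simp [PySem.List.pyRange]]
    apply pvTab_congr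
    intro m hm n hn
    simp only [phiB]
    split_ifs with h1 h2
    · obtain ⟨rfl, hn0⟩ := h1
      obtain rfl : n = 0 := by omega
      exact (pvF_zero_zero l1 l2 O).symm
    · obtain ⟨rfl, hm0⟩ := h2
      obtain rfl : m = 0 := by omega
      exact (pvF_zero_zero l1 l2 O).symm
    · rfl
  | succ k ih =>
    rw [show (((k+1+1:Nat)):Int) = (((k+1:Nat)):Int) + 1 from by push_cast; ring]
    rw [PySem.List.pyRange_one_succ_right (by omega), List.foldl_append]
    rw [ih (by omega)]
    simp only [List.foldl_cons, List.foldl_nil]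
    exact borderStep_tab l1 l2 O k (by omega)

lemma phiI_update (l1 l2 : List Int) (O M N : Nat) :
    ∀ m, m < O+1 → ∀ n, n < O+1 →
      (if m = M+1 ∧ n = N+1 then pvF l1 l2 O (M+1) (N+1) else phiI l1 l2 O (M+1) N m n)
        = phiI l1 l2 O (M+1) (N+1) m n := by
  intro m hm n hn
  by_cases h : m = M+1 ∧ n = N+1
  · obtain ⟨rfl, rfl⟩ := h
    rw [if_pos ⟨rfl, rfl⟩]
    simp only [phiI]
    split_ifs <;> first | rfl | omega | (subst_vars; rfl) | (exfalso; omega) | simp_all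
  · rw [if_neg h]
    simp only [phiI]
    split_ifs <;> first | rfl | omega | (subst_vars; rfl) | (exfalso; omega) | simp_all

lemma cellStep_tab (l1 l2 : List Int) (O M N : Nat) (hM : M + 1 ≤ O) (hN : N + 1 ≤ O) :
    pvCellStep l1 l2 ((O:Nat):Int) (((M+1:Nat)):Int) (pvTab (O+1) (phiI l1 l2 O (M+1) N)) (((N+1:Nat)):Int)
      = pvTab (O+1) (phiI l1 l2 O (M+1) (N+1)) := by
  unfold pvCellStep
  have e1 : (((N+1:Nat)):Int) - 1 = ((N:Nat):Int) := by push_cast; ring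
  have e2 : (((M+1:Nat)):Int) - 1 = ((M:Nat):Int) := by push_cast; ring
  have e3 : (((M+1:Nat)):Int) + (((N+1:Nat)):Int) - 1 = (((M+N+1:Nat)):Int) := by push_cast; ring
  rw [e1, e2, e3, PySem.List.pyGetD_natCast, PySem.List.pyGetD_natCast]
  rw [pvGet2_tab (O+1) _ (((M+1:Nat)):Int) ((N:Nat):Int) (by omega) (by omega) (by omega) (by omega)]
  rw [pvGet2_tab (O+1) _ ((M:Nat):Int) (((N+1:Nat)):Int) (by omega) (by omega) (by omega) (by omega)]
  simp only [Int.toNat_natCast]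
  have hr1 : phiI l1 l2 O (M+1) N (M+1) N = pvF l1 l2 O (M+1) N := by
    simp only [phiI]
    split_ifs <;> first | rfl | omega | (subst_vars; rfl) | (exfalso; omega) | simp_all
  have hr2 : phiI l1 l2 O (M+1) N M (N+1) = pvF l1 l2 O M (N+1) := by
    simp only [phiI]
    split_ifs <;> first | rfl | omega | (subst_vars; rfl) | (exfalso; omega) | simp_all
  rw [hr1, hr2]
  by_cases hc : M + N + 2 ≤ O
  · rw [if_pos (show (((M+1:Nat)):Int) + (((N+1:Nat)):Int) ≤ ((O:Nat):Int) from by push_cast; omega)]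
    have hv : pvF l1 l2 O (M+1) (N+1)
        = max (pvF l1 l2 O (M+1) N + l2.getD (M+N+1) 0) (pvF l1 l2 O M (N+1) + l1.getD (M+N+1) 0) := by
      rw [pvF_succ_succ, if_pos hc]
    rw [pvSet2_tab (O+1) _ (M+1) (N+1) _ (by omega) (by omega), ← hv]
    exact pvTab_congr _ _ _ (phiI_update l1 l2 O M N)
  · rw [if_neg (show ¬ ((((M+1:Nat)):Int) + (((N+1:Nat)):Int) ≤ ((O:Nat):Int)) from by push_cast; omega)]
    have hv : pvF l1 l2 O (M+1) (N+1)
        = max (pvF l1 l2 O M (N+1)) (pvF l1 l2 O (M+1) N) := by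
      rw [pvF_succ_succ, if_neg (by omega)]
    rw [pvSet2_tab (O+1) _ (M+1) (N+1) _ (by omega) (by omega), ← hv]
    exact pvTab_congr _ _ _ (phiI_update l1 l2 O M N)

lemma inner_loop (l1 l2 : List Int) (O M N : Nat) (hM : M + 1 ≤ O) (hN : N ≤ O) :
    (PySem.List.pyRange 1 (((N+1:Nat)):Int)).foldl (pvCellStep l1 l2 ((O:Nat):Int) (((M+1:Nat)):Int))
        (pvTab (O+1) (phiI l1 l2 O (M+1) 0))
      = pvTab (O+1) (phiI l1 l2 O (M+1) N) := by
  induction N with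
  | zero =>
    rw [show (((0+1:Nat)):Int) = 1 from by norm_num]
    rw [show PySem.List.pyRange 1 1 = [] from by simp [PySem.List.pyRange]]
    rfl
  | succ N ih =>
    rw [show (((N+1+1:Nat)):Int) = (((N+1:Nat)):Int) + 1 from by push_cast; ring]
    rw [PySem.List.pyRange_one_succ_right (by omega), List.foldl_append]
    rw [ih (by omega)]
    simp only [List.foldl_cons, List.foldl_nil]
    exact cellStep_tab l1 l2 O M N hM (by omega)

lemma outer_loop (l1 l2 : List Int) (O M : Nat) (hM : M ≤ O) :
    (PySem.List.pyRange 1 (((M+1:Nat)):Int)).foldl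
        (fun t m => (PySem.List.pyRange 1 (((O+1:Nat)):Int)).foldl (pvCellStep l1 l2 ((O:Nat):Int) m) t)
        (pvTab (O+1) (phiI l1 l2 O 0 0))
      = pvTab (O+1) (phiI l1 l2 O M O) := by
  induction M with
  | zero =>
    rw [show (((0+1:Nat)):Int) = 1 from by norm_num]
    rw [show PySem.List.pyRange 1 1 = [] from by simp [PySem.List.pyRange]]
    apply pvTab_congr
    intro m hm n hn
    simp only [phiI]
    split_ifs <;> first | rfl | omega
  | succ M ih =>
    rw [show (((M+1+1:Nat)):Int) = (((M+1:Nat)):Int) + 1 from by push_cast; ring]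
    rw [PySem.List.pyRange_one_succ_right (by omega), List.foldl_append]
    rw [ih (by omega)]
    simp only [List.foldl_cons, List.foldl_nil]
    have hstart : pvTab (O+1) (phiI l1 l2 O M O) = pvTab (O+1) (phiI l1 l2 O (M+1) 0) := by
      apply pvTab_congr
      intro m hm n hn
      simp only [phiI]
      split_ifs <;> first | rfl | omega
    rw [hstart]
    exact inner_loop l1 l2 O M O hM le_rfl

lemma solution_eq_pvF (l1 l2 : List Int) (O : Nat) (o1 o2 : Int) :
    solution l1 l2 ((O:Nat):Int) o1 o2 = pvF l1 l2 O O O := by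
  unfold solution
  simp only [show ((O:Nat):Int) + 1 = (((O+1:Nat)):Int) from by push_cast; ring]
  have hinit : (PySem.List.pyRange 0 (((O+1:Nat)):Int)).map
      (fun _ => List.replicate ((((O+1:Nat)):Int)).toNat (0:Int)) = pvTab (O+1) (fun _ _ => 0) := by
    rw [PySem.List.pyRange_zero_natCast]
    simp [pvTab, pvRow, List.map_const', List.map_map, Function.comp_def]
  rw [hinit, border_loop l1 l2 O O le_rfl]
  have hbi : pvTab (O+1) (phiB l1 l2 O O) = pvTab (O+1) (phiI l1 l2 O 0 0) := by
    apply pvTab_congr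
    intro m hm n hn
    simp only [phiB, phiI]
    split_ifs <;> first | rfl | omega
  rw [hbi, outer_loop l1 l2 O O le_rfl]
  unfold pvGet2
  rw [PySem.List.pyGetD_neg_ofNat (pvTab (O+1) (phiI l1 l2 O O O)) 1 [] (by omega) (by simp [pvTab, pvRow])]
  have hlen : (pvTab (O+1) (phiI l1 l2 O O O)).length - 1 = O := by simp [pvTab, pvRow]
  have hrow : (pvTab (O+1) (phiI l1 l2 O O O))[(pvTab (O+1) (phiI l1 l2 O O O)).length - 1]'(by simp [pvTab, pvRow]) = pvRow (O+1) (phiI l1 l2 O O O O) := by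
    simp [pvTab, pvRow, hlen]
  rw [hrow]
  rw [PySem.List.pyGetD_neg_ofNat (pvRow (O+1) (phiI l1 l2 O O O O)) 1 0 (by omega) (by simp [pvRow])]
  have hval : (pvRow (O+1) (phiI l1 l2 O O O O))[(pvRow (O+1) (phiI l1 l2 O O O O)).length - 1]'(by simp [pvRow]) = phiI l1 l2 O O O O O := by
    simp [pvRow]
  rw [hval]
  simp only [phiI]
  split_ifs <;> first | rfl | omega | (subst_vars; rfl) | simp_all

-- ---------- B-side: the prev array after each diagonal ----------

def psiD (l1 l2 : List Int) (O d : Nat) (m : Nat) : Int :=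
  if d - O ≤ m ∧ m ≤ min d O then pvF l1 l2 O m (d - m) else 0

def chiD (l1 l2 : List Int) (O d a j : Nat) (m : Nat) : Int :=
  if a ≤ m ∧ m < a + j then pvF l1 l2 O m (d + 1 - m) else 0

lemma diagCell_row (l1 l2 : List Int) (O d j : Nat)
    (hj : (d + 1 - O) + j ≤ min (d+1) O) :
    pvDiagCell l1 l2 (pvRow (O+1) (psiD l1 l2 O d)) ((O:Nat):Int) (((d+1:Nat)):Int)
        (pvRow (O+1) (chiD l1 l2 O d (d+1-O) j)) (((d+1-O+j:Nat)):Int)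
      = pvRow (O+1) (chiD l1 l2 O d (d+1-O) (j+1)) := by
  set a := d + 1 - O with ha
  simp only [pvDiagCell]
  by_cases h0 : a + j = 0
  · -- m == 0 : first column of the diagonal, hence d + 1 ≤ O
    rw [if_pos (show (((a+j:Nat)):Int) = 0 from by omega)]
    rw [show (((d+1:Nat)):Int) - 1 = ((d:Nat):Int) from by push_cast; ring]
    rw [PySem.List.pyGetD_natCast]
    rw [pvRow_get (O+1) _ 0 (by omega) (by omega)]
    simp only [Int.toNat_zero]
    have hv : psiD l1 l2 O d 0 = pvF l1 l2 O 0 d := by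
      simp only [psiD]
      rw [if_pos (show d - O ≤ 0 ∧ 0 ≤ min d O from by omega)]
      rw [show d - 0 = d from by omega]
    rw [hv, ← pvF_zero_succ]
    rw [pvRow_set (O+1) _ 0 _ (by omega)]
    apply pvRow_congr
    intro m hm
    by_cases hm0 : m = 0
    · subst hm0
      rw [if_pos rfl]
      simp only [chiD]
      rw [if_pos (show a ≤ 0 ∧ 0 < a + (j+1) from by omega)]
      rw [show d + 1 - 0 = d + 1 from by omega]
    · rw [if_neg hm0]
      simp only [chiD]
      split_ifs <;> first | rfl | omega
  · rw [if_neg (show ¬((((a+j:Nat)):Int) = 0) from by omega)]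
    by_cases hn : d + 1 = a + j
    · -- n == 0 : last row of the diagonal, hence m = d + 1 ≤ O
      rw [if_pos (show (((d+1:Nat)):Int) - (((a+j:Nat)):Int) = 0 from by omega)]
      rw [show (((a+j:Nat)):Int) - 1 = (((a+j-1:Nat)):Int) from by omega]
      rw [pvRow_get (O+1) _ (((a+j-1:Nat)):Int) (by omega) (by omega)]
      rw [show (((d+1:Nat)):Int) - 1 = ((d:Nat):Int) from by push_cast; ring, PySem.List.pyGetD_natCast]
      simp only [Int.toNat_natCast]
      have hv : psiD l1 l2 O d (a+j-1) = pvF l1 l2 O d 0 := by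
        simp only [psiD]
        rw [if_pos (show d - O ≤ a+j-1 ∧ a+j-1 ≤ min d O from by omega)]
        rw [show a+j-1 = d from by omega, show d - d = 0 from by omega]
      rw [hv, ← pvF_succ_zero]
      rw [pvRow_set (O+1) _ (a+j) _ (by omega)]
      apply pvRow_congr
      intro m hm
      by_cases hm' : m = a + j
      · subst hm'
        rw [if_pos rfl]
        simp only [chiD]
        rw [if_pos (show a ≤ a+j ∧ a+j < a+(j+1) from by omega)]
        rw [show d + 1 - (a+j) = 0 from by omega, ← hn]
      · rw [if_neg hm']
        simp only [chiD]
        split_ifs <;> first | rfl | omega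
    · rw [if_neg (show ¬((((d+1:Nat)):Int) - (((a+j:Nat)):Int) = 0) from by omega)]
      by_cases hdO : d + 1 ≤ O
      · -- interior cell of an early diagonal: the two-way DP max
        rw [if_pos (show (((d+1:Nat)):Int) ≤ ((O:Nat):Int) from by omega)]
        rw [show (((a+j:Nat)):Int) - 1 = (((a+j-1:Nat)):Int) from by omega]
        rw [pvRow_get (O+1) _ (((a+j:Nat)):Int) (by omega) (by omega)]
        rw [pvRow_get (O+1) _ (((a+j-1:Nat)):Int) (by omega) (by omega)]
        rw [show (((d+1:Nat)):Int) - 1 = ((d:Nat):Int) from by push_cast; ring]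
        simp only [Int.toNat_natCast, PySem.List.pyGetD_natCast]
        have hv1 : psiD l1 l2 O d (a+j) = pvF l1 l2 O (a+j) (d - (a+j)) := by
          simp only [psiD]
          rw [if_pos (show d - O ≤ a+j ∧ a+j ≤ min d O from by omega)]
        have hv2 : psiD l1 l2 O d (a+j-1) = pvF l1 l2 O (a+j-1) (d - (a+j-1)) := by
          simp only [psiD]
          rw [if_pos (show d - O ≤ a+j-1 ∧ a+j-1 ≤ min d O from by omega)]
        rw [hv1, hv2]
        rw [pvRow_set (O+1) _ (a+j) _ (by omega)]
        apply pvRow_congr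
        intro m hm
        by_cases hm' : m = a + j
        · subst hm'
          rw [if_pos rfl]
          simp only [chiD]
          rw [if_pos (show a ≤ a+j ∧ a+j < a+(j+1) from by omega)]
          obtain ⟨M', hM'⟩ : ∃ M', a + j = M' + 1 := ⟨a+j-1, by omega⟩
          rw [hM', show M'+1-1 = M' from by omega,
              show d + 1 - (M'+1) = (d - (M'+1)) + 1 from by omega,
              show d - M' = (d - (M'+1)) + 1 from by omega]
          rw [pvF_succ_succ, if_pos (show M' + (d - (M'+1)) + 2 ≤ O from by omega)]
          rw [show M' + (d - (M'+1)) + 1 = d from by omega]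
        · rw [if_neg hm']
          simp only [chiD]
          split_ifs <;> first | rfl | omega
      · -- late diagonal: pure max-propagation
        rw [if_neg (show ¬((((d+1:Nat)):Int) ≤ ((O:Nat):Int)) from by omega)]
        rw [show (((a+j:Nat)):Int) - 1 = (((a+j-1:Nat)):Int) from by omega]
        rw [pvRow_get (O+1) _ (((a+j-1:Nat)):Int) (by omega) (by omega)]
        rw [pvRow_get (O+1) _ (((a+j:Nat)):Int) (by omega) (by omega)]
        simp only [Int.toNat_natCast]
        have hv1 : psiD l1 l2 O d (a+j) = pvF l1 l2 O (a+j) (d - (a+j)) := by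
          simp only [psiD]
          rw [if_pos (show d - O ≤ a+j ∧ a+j ≤ min d O from by omega)]
        have hv2 : psiD l1 l2 O d (a+j-1) = pvF l1 l2 O (a+j-1) (d - (a+j-1)) := by
          simp only [psiD]
          rw [if_pos (show d - O ≤ a+j-1 ∧ a+j-1 ≤ min d O from by omega)]
        rw [hv1, hv2]
        rw [pvRow_set (O+1) _ (a+j) _ (by omega)]
        apply pvRow_congr
        intro m hm
        by_cases hm' : m = a + j
        · subst hm'
          rw [if_pos rfl]
          simp only [chiD]
          rw [if_pos (show a ≤ a+j ∧ a+j < a+(j+1) from by omega)]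
          obtain ⟨M', hM'⟩ : ∃ M', a + j = M' + 1 := ⟨a+j-1, by omega⟩
          rw [hM', show M'+1-1 = M' from by omega,
              show d + 1 - (M'+1) = (d - (M'+1)) + 1 from by omega,
              show d - M' = (d - (M'+1)) + 1 from by omega]
          rw [pvF_succ_succ, if_neg (show ¬(M' + (d - (M'+1)) + 2 ≤ O) from by omega)]
        · rw [if_neg hm']
          simp only [chiD]
          split_ifs <;> first | rfl | omega

lemma diag_inner (l1 l2 : List Int) (O d j : Nat)
    (hj : (d + 1 - O) + j ≤ min (d+1) O + 1) :
    (PySem.List.pyRange (((d+1-O:Nat)):Int) ((((d+1-O:Nat)):Int) + ((j:Nat):Int))).foldl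
        (pvDiagCell l1 l2 (pvRow (O+1) (psiD l1 l2 O d)) ((O:Nat):Int) (((d+1:Nat)):Int))
        (pvRow (O+1) (fun _ => 0))
      = pvRow (O+1) (chiD l1 l2 O d (d+1-O) j) := by
  induction j with
  | zero =>
    rw [show (((0:Nat)):Int) = 0 from by norm_num, add_zero]
    rw [show PySem.List.pyRange (((d+1-O:Nat)):Int) (((d+1-O:Nat)):Int) = [] from by
      simp [PySem.List.pyRange]]
    apply pvRow_congr
    intro m hm
    simp only [chiD]
    split_ifs <;> first | rfl | omega
  | succ j ih =>
    rw [show (((j+1:Nat)):Int) = ((j:Nat):Int) + 1 from by push_cast; ring, ← add_assoc]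
    rw [PySem.List.pyRange_one_succ_right (by omega), List.foldl_append]
    rw [ih (by omega)]
    simp only [List.foldl_cons, List.foldl_nil]
    rw [show (((d+1-O:Nat)):Int) + ((j:Nat):Int) = (((d+1-O+j:Nat)):Int) from by push_cast; ring]
    exact diagCell_row l1 l2 O d j (by omega)

lemma diagStep_row (l1 l2 : List Int) (O d : Nat) (hd : d + 1 ≤ 2*O) :
    pvDiagStep l1 l2 ((O:Nat):Int) (pvRow (O+1) (psiD l1 l2 O d)) (((d+1:Nat)):Int)
      = pvRow (O+1) (psiD l1 l2 O (d+1)) := by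
  unfold pvDiagStep
  rw [show max 0 ((((d+1:Nat)):Int) - ((O:Nat):Int)) = (((d+1-O:Nat)):Int) from by omega]
  rw [show min (((d+1:Nat)):Int) ((O:Nat):Int) + 1
        = (((d+1-O:Nat)):Int) + (((min (d+1) O + 1 - (d+1-O):Nat)):Int) from by omega]
  rw [show (((O:Nat):Int) + 1).toNat = O + 1 from by omega]
  rw [show List.replicate (O+1) (0:Int) = pvRow (O+1) (fun _ => 0) from by
    simp [pvRow, List.map_const']]
  rw [diag_inner l1 l2 O d (min (d+1) O + 1 - (d+1-O)) (by omega)]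
  apply pvRow_congr
  intro m hm
  simp only [chiD, psiD]
  split_ifs <;> first | rfl | omega

lemma diag_loop (l1 l2 : List Int) (O d : Nat) (hd : d ≤ 2*O) :
    (PySem.List.pyRange 1 (((d+1:Nat)):Int)).foldl (pvDiagStep l1 l2 ((O:Nat):Int))
        (pvRow (O+1) (fun _ => 0))
      = pvRow (O+1) (psiD l1 l2 O d) := by
  induction d with
  | zero =>
    rw [show (((0+1:Nat)):Int) = 1 from by norm_num]
    rw [show PySem.List.pyRange 1 1 = [] from by simp [PySem.List.pyRange]]
    apply pvRow_congr
    intro m hm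
    simp only [psiD]
    split_ifs with h
    · obtain rfl : m = 0 := by omega
      rw [show (0:Nat) - 0 = 0 from rfl]
      exact (pvF_zero_zero l1 l2 O).symm
    · rfl
  | succ d ih =>
    rw [show (((d+1+1:Nat)):Int) = (((d+1:Nat)):Int) + 1 from by push_cast; ring]
    rw [PySem.List.pyRange_one_succ_right (by omega), List.foldl_append]
    rw [ih (by omega)]
    simp only [List.foldl_cons, List.foldl_nil]
    exact diagStep_row l1 l2 O d (by omega)

lemma alt_eq_pvF (l1 l2 : List Int) (O : Nat) (o1 o2 : Int) :
    solution_alt l1 l2 ((O:Nat):Int) o1 o2 = pvF l1 l2 O O O := by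
  unfold solution_alt
  rw [show 2 * ((O:Nat):Int) + 1 = (((2*O+1:Nat)):Int) from by push_cast; ring]
  rw [show (((O:Nat):Int) + 1).toNat = O + 1 from by omega]
  rw [show List.replicate (O+1) (0:Int) = pvRow (O+1) (fun _ => 0) from by
    simp [pvRow, List.map_const']]
  show PySem.List.pyGetD ((PySem.List.pyRange 1 (((2*O+1:Nat)):Int)).foldl
      (pvDiagStep l1 l2 ((O:Nat):Int)) (pvRow (O+1) (fun _ => 0))) ((O:Nat):Int) 0
    = pvF l1 l2 O O O
  rw [diag_loop l1 l2 O (2*O) (by omega)]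
  rw [pvRow_get (O+1) _ ((O:Nat):Int) (by omega) (by omega)]
  simp only [Int.toNat_natCast]
  simp only [psiD]
  rw [if_pos (show 2*O - O ≤ O ∧ O ≤ min (2*O) O from by omega)]
  rw [show 2*O - O = O from by omega]

-- ===== VERDICT (by name: the statement is the Claim_ definition above) =====
theorem solution_spec : Claim_equal_solution := by
  intro l1 l2 o o1 o2 _hdom hpre
  obtain ⟨ho, -, -⟩ := hpre
  obtain ⟨O, rfl⟩ : ∃ O : Nat, o = (O:Int) := ⟨o.toNat, by omega⟩
  unfold Spec_solution
  rw [solution_eq_pvF, alt_eq_pvF]
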